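-- pv_equiv track=rewrite | github.com/davidbfi/bfipricecrawler | bfipricecrawler/utils/utils.py | pricebook_tab_specifications_parser
-- ===== SOURCE A (Python) =====
-- import itertools
--
-- def pricebook_tab_specifications_parser(elspecifications):
--     specification = []
--     for line in elspecifications:
--         if not (line.strip() == "" or line.strip() == 'Key Specifications' or line.strip() == 'Spesifikasi' or
--                 line.strip() == 'Basic Info' or line.strip() == 'Engine' or line.strip() == 'Performance' or
--                 line.strip() == 'Capacity' or line.strip() == 'Design & Dimension' or
--                 line.strip() == 'Lihat Selengkapnya' or line.strip() == 'Lihat selengkapnya'):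
--             specification.append(line.strip())
--
--     return dict(itertools.zip_longest(*[iter(specification)] * 2, fillvalue=""))
-- ===== SOURCE B (Python) =====
-- _SKIP = {"", "Key Specifications", "Spesifikasi", "Basic Info", "Engine",
--          "Performance", "Capacity", "Design & Dimension",
--          "Lihat Selengkapnya", "Lihat selengkapnya"}
--
--
-- def pricebook_tab_specifications_parser(elspecifications):
--     result = {}
--     key = None
--     for line in elspecifications:
--         s = line.strip()
--         if s in _SKIP:
--             continue
--         if key is None:
--             key = s
--         else:
--             result[key] = s
--             key = None
--     if key is not None:
--         result[key] = ""
--     return result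
-- ===== Notes on version B (the rewrite author's own statement) =====
-- stated objective: faster
-- what changed: Replaces the two-pass filter-into-list then zip_longest-grouper-into-dict idiom by a single stateful pass with a pending-key variable that builds the dict directly; each line is stripped once and the ten chained header comparisons become one set-membership test.
import Mathlib
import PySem

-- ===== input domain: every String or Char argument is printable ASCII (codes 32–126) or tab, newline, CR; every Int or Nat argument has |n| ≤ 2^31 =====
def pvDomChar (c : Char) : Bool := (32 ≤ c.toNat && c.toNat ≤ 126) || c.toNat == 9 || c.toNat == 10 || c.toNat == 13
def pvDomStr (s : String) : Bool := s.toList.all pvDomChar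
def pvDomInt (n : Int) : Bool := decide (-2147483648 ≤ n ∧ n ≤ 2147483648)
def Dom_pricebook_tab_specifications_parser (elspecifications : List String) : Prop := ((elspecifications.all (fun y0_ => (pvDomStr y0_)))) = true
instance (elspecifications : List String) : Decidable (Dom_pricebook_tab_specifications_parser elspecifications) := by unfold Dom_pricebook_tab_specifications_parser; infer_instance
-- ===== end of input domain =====

-- B replaces A's two passes (filter into a list, then zip_longest-pair that list into a dict)
-- by one stateful pass with a pending-key variable building the dict directly; same return value.

-- ===== PORT A =====
-- A's keep-condition: the 'not (line.strip() == "" or ... )' test, transliterated.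
def pvKeepA (line : String) : Bool :=
  !(PySem.Str.strip line == "" || PySem.Str.strip line == "Key Specifications" ||
    PySem.Str.strip line == "Spesifikasi" || PySem.Str.strip line == "Basic Info" ||
    PySem.Str.strip line == "Engine" || PySem.Str.strip line == "Performance" ||
    PySem.Str.strip line == "Capacity" || PySem.Str.strip line == "Design & Dimension" ||
    PySem.Str.strip line == "Lihat Selengkapnya" || PySem.Str.strip line == "Lihat selengkapnya")

-- itertools.zip_longest(*[iter(spec)]*2, fillvalue="") : consecutive pairs, odd tail filled with "".
def pvGrouperA : List String → List (String × String)
  | [] => []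
  | [k] => [(k, "")]
  | k :: v :: rest => (k, v) :: pvGrouperA rest

def pricebook_tab_specifications_parser (elspecifications : List String) : List (String × String) :=
  let specification := elspecifications.foldl
    (fun spec line => if pvKeepA line then spec ++ [PySem.Str.strip line] else spec) []
  (PySem.Dict.ofList (pvGrouperA specification)).items

-- ===== PORT B =====
def pvSkipB : List String :=
  ["", "Key Specifications", "Spesifikasi", "Basic Info", "Engine", "Performance",
   "Capacity", "Design & Dimension", "Lihat Selengkapnya", "Lihat selengkapnya"]

def pvGoB : List String → PySem.Dict String String → Option String → PySem.Dict String String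
  | [], d, none => d
  | [], d, some k => d.insert k ""
  | line :: rest, d, p =>
    let s := PySem.Str.strip line
    if pvSkipB.contains s then pvGoB rest d p
    else
      match p with
      | none => pvGoB rest d (some s)
      | some k => pvGoB rest (d.insert k s) none

def pricebook_tab_specifications_parser_alt (elspecifications : List String) : List (String × String) :=
  (pvGoB elspecifications PySem.Dict.empty none).items

-- ===== PRECONDITION & SPEC =====
def Spec_pricebook_tab_specifications_parser (elspecifications : List String) (out : List (String × String)) : Prop := out = pricebook_tab_specifications_parser_alt elspecifications
instance (elspecifications : List String) (out : List (String × String)) : Decidable (Spec_pricebook_tab_specifications_parser elspecifications out) := by unfold Spec_pricebook_tab_specifications_parser; infer_instance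

-- ===== CLAIM (what is proved, stated in full; the proofs are below) =====
def Claim_equal_pricebook_tab_specifications_parser : Prop := ∀ (elspecifications : List String), Dom_pricebook_tab_specifications_parser elspecifications → Spec_pricebook_tab_specifications_parser elspecifications (pricebook_tab_specifications_parser elspecifications)

-- ===== LEMMAS AND PROOFS =====

-- A's filtered list, as a structural recursion.
def pvFilt : List String → List String
  | [] => []
  | x :: xs => if pvKeepA x then PySem.Str.strip x :: pvFilt xs else pvFilt xs

theorem pvFoldl_filt (l : List String) (acc : List String) :
    l.foldl (fun spec line => if pvKeepA line then spec ++ [PySem.Str.strip line] else spec) acc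
      = acc ++ pvFilt l := by
  induction l generalizing acc with
  | nil => simp [pvFilt]
  | cons x xs ih =>
    simp only [List.foldl_cons, pvFilt]
    split <;> simp [ih]

-- pairing with an optional pending key
def pvPairsP : Option String → List String → List (String × String)
  | none, [] => []
  | some k, [] => [(k, "")]
  | none, x :: xs => pvPairsP (some x) xs
  | some k, x :: xs => (k, x) :: pvPairsP none xs

theorem pvGrouperA_eq (l : List String) : pvGrouperA l = pvPairsP none l := by
  fun_induction pvGrouperA l with
  | case1 => rfl
  | case2 k => rfl
  | case3 k v rest ih => simp [pvPairsP, ih]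

set_option maxRecDepth 4000 in
theorem pvSkip_eq (line : String) : pvSkipB.contains (PySem.Str.strip line) = !pvKeepA line := by
  simp only [pvSkipB, pvKeepA, List.contains_cons, List.contains_nil, Bool.or_false,
    Bool.not_not, Bool.or_assoc]

theorem pvGoB_eq (l : List String) (d : PySem.Dict String String) (p : Option String) :
    pvGoB l d p = (pvPairsP p (pvFilt l)).foldl (fun d kv => d.insert kv.1 kv.2) d := by
  induction l generalizing d p with
  | nil => cases p <;> simp [pvGoB, pvPairsP, pvFilt]
  | cons x xs ih =>
    simp only [pvGoB, pvFilt, pvSkip_eq]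
    by_cases hk : pvKeepA x
    · simp only [hk, if_pos, Bool.not_true, Bool.false_eq_true, if_false]
      cases p with
      | none => simpa [pvPairsP] using ih d (some (PySem.Str.strip x))
      | some k => simpa [pvPairsP] using ih (d.insert k (PySem.Str.strip x)) none
    · simp only [hk, Bool.not_false, if_true, Bool.false_eq_true, if_false]
      exact ih d p

theorem pvOfList_eq (ps : List (String × String)) :
    PySem.Dict.ofList ps = ps.foldl (fun d kv => d.insert kv.1 kv.2) PySem.Dict.empty := by
  rfl

-- ===== VERDICT (by name: the statement is the Claim_ definition above) =====
theorem pricebook_tab_specifications_parser_spec : Claim_equal_pricebook_tab_specifications_parser := by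
  intro el _
  unfold Spec_pricebook_tab_specifications_parser
  unfold pricebook_tab_specifications_parser pricebook_tab_specifications_parser_alt
  simp only [pvGoB_eq, pvFoldl_filt, List.nil_append, pvGrouperA_eq, pvOfList_eq]
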